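-- pv_equiv track=rewrite | github.com/Astre06/Testing-Raven | Fastcheck.py | sanitize_for_telegram
-- ===== SOURCE A (Python) =====
-- def sanitize_for_telegram(text):
--     """Remove or escape characters that cause Telegram entity parsing issues"""
--     if not text:
--         return "N/A"
--
--     # Replace problematic characters
--     text = str(text)
--     text = text.replace('&', 'and')
--     text = text.replace('<', '(')
--     text = text.replace('>', ')')
--     text = text.replace('[', '(')
--     text = text.replace(']', ')')
--     text = text.replace('*', '-')
--     text = text.replace('_', '-')
--     text = text.replace('`', "'")
--     text = text.replace('|', '-')
--
--     # Remove any control characters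
--     text = ''.join(char for char in text if ord(char) >= 32 or char in '\n\r\t')
--
--     return text.strip() if text.strip() else "N/A"
-- ===== SOURCE B (Python) =====
-- _MAP = {'&': 'and', '<': '(', '>': ')', '[': '(', ']': ')',
--         '*': '-', '_': '-', '`': "'", '|': '-'}
--
--
-- def sanitize_for_telegram(text):
--     if not text:
--         return "N/A"
--     text = str(text)
--     parts = []
--     for c in text:
--         r = _MAP.get(c)
--         if r is not None:
--             parts.append(r)
--         elif ord(c) >= 32 or c in '\n\r\t':
--             parts.append(c)
--     stripped = ''.join(parts).strip()
--     return stripped if stripped else "N/A"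
-- ===== Notes on version B (the rewrite author's own statement) =====
-- stated objective: alternative
-- what changed: Replaced A's ten sequential full-string passes (nine .replace calls plus a filtering join) with a single pass over the characters using a lookup table built once, emitting each character's replacement (or dropping/keeping it) in one traversal.
import Mathlib
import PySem

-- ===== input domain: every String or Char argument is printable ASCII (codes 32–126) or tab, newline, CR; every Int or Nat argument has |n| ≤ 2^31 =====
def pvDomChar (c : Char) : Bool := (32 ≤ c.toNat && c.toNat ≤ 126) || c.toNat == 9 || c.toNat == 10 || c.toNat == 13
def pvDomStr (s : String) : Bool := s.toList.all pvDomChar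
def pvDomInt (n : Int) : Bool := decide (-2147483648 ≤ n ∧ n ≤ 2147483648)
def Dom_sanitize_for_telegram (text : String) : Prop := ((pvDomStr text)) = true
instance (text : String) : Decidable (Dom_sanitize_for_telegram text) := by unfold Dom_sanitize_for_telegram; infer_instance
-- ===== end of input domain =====

-- B replaces A's ten sequential full-string passes (nine .replace calls plus a filtering join)
-- by one single pass with a lookup table; objective: alternative (one traversal instead of ten).

-- ===== PORT A =====
def sanitize_for_telegram (text : String) : String :=
  if text = "" then "N/A"
  else
    let t1 := PySem.Str.replace text "&" "and"
    let t2 := PySem.Str.replace t1 "<" "("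
    let t3 := PySem.Str.replace t2 ">" ")"
    let t4 := PySem.Str.replace t3 "[" "("
    let t5 := PySem.Str.replace t4 "]" ")"
    let t6 := PySem.Str.replace t5 "*" "-"
    let t7 := PySem.Str.replace t6 "_" "-"
    let t8 := PySem.Str.replace t7 "`" "'"
    let t9 := PySem.Str.replace t8 "|" "-"
    -- ''.join(char for char in text if ord(char) >= 32 or char in '\n\r\t'):
    -- a join of the kept single characters is exactly a filter (single-char 'in' = membership)
    let t := String.ofList (t9.toList.filter (fun c => 32 ≤ c.toNat || ['\n', '\r', '\t'].contains c))
    if PySem.Str.strip t ≠ "" then PySem.Str.strip t else "N/A"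

-- ===== PORT B =====
-- the module-level _MAP dict of Source B
def pvMap : PySem.Dict Char (List Char) :=
  PySem.Dict.mk [('&', "and".toList), ('<', "(".toList), ('>', ")".toList),
    ('[', "(".toList), (']', ")".toList), ('*', "-".toList), ('_', "-".toList),
    ('`', "'".toList), ('|', "-".toList)]

-- the body of Source B's loop: what gets appended to parts for one character
def pvEmit (c : Char) : List Char :=
  match PySem.Dict.get? pvMap c with
  | some r => r
  | none => if 32 ≤ c.toNat || ['\n', '\r', '\t'].contains c then [c] else []

def sanitize_for_telegram_alt (text : String) : String :=
  if text = "" then "N/A"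
  else
    -- the for-loop appending pieces to parts, then ''.join(parts)
    let cs := text.toList.flatMap pvEmit
    let stripped := PySem.Str.strip (String.ofList cs)
    if stripped ≠ "" then stripped else "N/A"

-- ===== PRECONDITION & SPEC =====
def Spec_sanitize_for_telegram (text : String) (out : String) : Prop := out = sanitize_for_telegram_alt text
instance (text : String) (out : String) : Decidable (Spec_sanitize_for_telegram text out) := by unfold Spec_sanitize_for_telegram; infer_instance

-- ===== CLAIM (what is proved, stated in full; the proofs are below) =====
def Claim_equal_sanitize_for_telegram : Prop := ∀ (text : String), Dom_sanitize_for_telegram text → Spec_sanitize_for_telegram text (sanitize_for_telegram text)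

-- ===== LEMMAS AND PROOFS =====

-- a single-character .replace is a per-character expansion
theorem replace_go_single (a : Char) (new : List Char) :
    ∀ (l acc : List Char) (fuel : Nat), l.length ≤ fuel →
      PySem.Chars.replace.go [a] new fuel l acc
        = acc.reverse ++ l.flatMap (fun c => if c = a then new else [c]) := by
  intro l
  induction l with
  | nil => intro acc fuel _; cases fuel <;> simp [PySem.Chars.replace.go]
  | cons c t ih =>
    intro acc fuel hf
    cases fuel with
    | zero => simp at hf
    | succ f =>
      by_cases h : a = c
      · subst h
        have hstep : PySem.Chars.replace.go [a] new (f + 1) (a :: t) acc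
            = PySem.Chars.replace.go [a] new f t (new.reverse ++ acc) := by
          simp [PySem.Chars.replace.go, List.isPrefixOf]
        rw [hstep, ih _ f (by simpa using hf)]
        simp
      · have hstep : PySem.Chars.replace.go [a] new (f + 1) (c :: t) acc
            = PySem.Chars.replace.go [a] new f t (c :: acc) := by
          simp [PySem.Chars.replace.go, List.isPrefixOf, h]
        rw [hstep, ih _ f (by simpa using hf)]
        simp [show ¬ c = a from fun hh => h hh.symm]

theorem replace_single (s : List Char) (a : Char) (new : List Char) :
    PySem.Chars.replace s [a] new = s.flatMap (fun c => if c = a then new else [c]) := by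
  rw [PySem.Chars.replace]
  simp only [List.isEmpty_cons, Bool.false_eq_true]
  exact replace_go_single a new s [] s.length le_rfl

-- the per-character composition of A's nine replaces and the control-character filter
-- equals Source B's loop body
theorem perchar (c : Char) :
    List.flatMap
      (fun a =>
        List.flatMap
          (fun a =>
            List.flatMap
              (fun a =>
                List.flatMap
                  (fun a =>
                    List.flatMap
                      (fun a =>
                        List.flatMap
                          (fun a =>
                            List.flatMap
                              (fun a =>
                                List.flatMap
                                  (fun a =>
                                    List.filter (fun c => decide (32 ≤ c.toNat) || ['\n', '\x0d', '\t'].contains c)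
                                      (if a = '|' then ['-'] else [a]))
                                  (if a = '`' then ['\''] else [a]))
                              (if a = '_' then ['-'] else [a]))
                          (if a = '*' then ['-'] else [a]))
                      (if a = ']' then [')'] else [a]))
                  (if a = '[' then ['('] else [a]))
              (if a = '>' then [')'] else [a]))
          (if a = '<' then ['('] else [a]))
      (if c = '&' then ['a', 'n', 'd'] else [c])
    = pvEmit c := by
  by_cases h1 : c = '&'; · subst h1; decide
  by_cases h2 : c = '<'; · subst h2; decide
  by_cases h3 : c = '>'; · subst h3; decide
  by_cases h4 : c = '['; · subst h4; decide
  by_cases h5 : c = ']'; · subst h5; decide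
  by_cases h6 : c = '*'; · subst h6; decide
  by_cases h7 : c = '_'; · subst h7; decide
  by_cases h8 : c = '`'; · subst h8; decide
  by_cases h9 : c = '|'; · subst h9; decide
  simp only [if_neg h1, if_neg h2, if_neg h3, if_neg h4, if_neg h5, if_neg h6,
    if_neg h7, if_neg h8, if_neg h9, List.flatMap_cons, List.flatMap_nil, List.append_nil,
    pvEmit, pvMap, PySem.Dict.get?_mk_cons]
  have k1 : ('&' == c) = false := by simp [Ne.symm h1]
  have k2 : ('<' == c) = false := by simp [Ne.symm h2]
  have k3 : ('>' == c) = false := by simp [Ne.symm h3]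
  have k4 : ('[' == c) = false := by simp [Ne.symm h4]
  have k5 : (']' == c) = false := by simp [Ne.symm h5]
  have k6 : ('*' == c) = false := by simp [Ne.symm h6]
  have k7 : ('_' == c) = false := by simp [Ne.symm h7]
  have k8 : ('`' == c) = false := by simp [Ne.symm h8]
  have k9 : ('|' == c) = false := by simp [Ne.symm h9]
  simp only [k1, k2, k3, k4, k5, k6, k7, k8, k9, PySem.Dict.get?, List.filter]
  by_cases hn : c = '\n'; · subst hn; decide
  by_cases hr : c = '\x0d'; · subst hr; decide
  by_cases ht : c = '\t'; · subst ht; decide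
  by_cases hc : 32 ≤ c.toNat <;> simp [hn, hr, ht, hc]

-- ===== VERDICT (by name: the statement is the Claim_ definition above) =====
set_option maxHeartbeats 1000000 in
theorem sanitize_for_telegram_spec : Claim_equal_sanitize_for_telegram := by
  intro text _
  unfold Spec_sanitize_for_telegram sanitize_for_telegram sanitize_for_telegram_alt
  by_cases h : text = ""
  · simp [h]
  · simp only [if_neg h]
    have : (PySem.Str.replace (PySem.Str.replace (PySem.Str.replace (PySem.Str.replace
        (PySem.Str.replace (PySem.Str.replace (PySem.Str.replace (PySem.Str.replace
        (PySem.Str.replace text "&" "and") "<" "(") ">" ")") "[" "(") "]" ")")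
        "*" "-") "_" "-") "`" "'") "|" "-").toList.filter
        (fun c => 32 ≤ c.toNat || ['\n', '\r', '\t'].contains c)
        = text.toList.flatMap pvEmit := by
      simp only [PySem.Str.toList_replace]
      rw [show "&".toList = ['&'] by decide, show "<".toList = ['<'] by decide,
        show ">".toList = ['>'] by decide, show "[".toList = ['['] by decide,
        show "]".toList = [']'] by decide, show "*".toList = ['*'] by decide,
        show "_".toList = ['_'] by decide, show "`".toList = ['`'] by decide,
        show "|".toList = ['|'] by decide, show "and".toList = ['a', 'n', 'd'] by decide,
        show "(".toList = ['('] by decide, show ")".toList = [')'] by decide,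
        show "-".toList = ['-'] by decide, show "'".toList = ['\''] by decide]
      simp only [replace_single]
      simp only [List.flatMap_assoc, List.filter_flatMap]
      exact List.flatMap_congr (fun c _ => perchar c)
    rw [this]
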